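-- pv_equiv track=rewrite | github.com/zemingzhang1/Team-14-EAS-503-Project | mycredlib.py | extract_all_fields
-- ===== SOURCE A (Python) =====
-- def extract_all_fields(data):
--     # Extracting all column values as a single dictionary to determine its data type
--     data_dic = {}
--     for ele in data:
--         for key, value in ele.items():
--             if value.strip() != '':
--                 if key not in data_dic.keys():
--                     data_dic.update({key: [value]})
--                 else:
--                     data_dic[key].append(value)
--     return data_dic
-- ===== SOURCE B (Python) =====
-- def extract_all_fields(data):
--     # Column-major reformulation: first collect the ordered list of keys that
--     # ever carry a non-blank value, then gather each key's column in one sweep.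
--     keys = []
--     seen = set()
--     for ele in data:
--         for key, value in ele.items():
--             if value.strip() != '' and key not in seen:
--                 seen.add(key)
--                 keys.append(key)
--     return {key: [value
--                   for ele in data
--                   for k, value in ele.items()
--                   if k == key and value.strip() != '']
--             for key in keys}
-- ===== Notes on version B (the rewrite author's own statement) =====
-- stated objective: alternative
-- what changed: Replaces A's row-major single pass that mutates a growing dict (insert-or-append per cell) with a column-major two-phase pass: a first scan records each key the first time it appears with a non-blank value, then a dict comprehension rebuilds each key's whole column from the data.
import Mathlib
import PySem

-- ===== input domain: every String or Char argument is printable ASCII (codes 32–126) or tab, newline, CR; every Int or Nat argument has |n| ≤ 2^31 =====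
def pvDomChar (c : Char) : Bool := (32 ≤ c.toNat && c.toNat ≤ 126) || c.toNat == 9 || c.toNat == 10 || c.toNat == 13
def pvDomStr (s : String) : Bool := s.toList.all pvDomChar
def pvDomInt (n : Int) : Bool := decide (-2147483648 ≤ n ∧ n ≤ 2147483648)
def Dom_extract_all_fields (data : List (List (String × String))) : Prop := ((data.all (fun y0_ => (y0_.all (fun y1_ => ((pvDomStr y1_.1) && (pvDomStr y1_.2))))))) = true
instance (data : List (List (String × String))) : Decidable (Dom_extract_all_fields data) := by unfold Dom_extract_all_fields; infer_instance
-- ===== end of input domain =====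

-- B replaces A's row-major dict-mutating pass by a column-major two-phase pass
-- (first-appearance key scan, then one column sweep per key): an alternative
-- decomposition of the same grouping, not claimed faster.


-- ===== PORT A =====
-- one iteration of A's inner loop: insert-or-append the cell into the dict
def pvStepA (dic : PySem.Dict String (List String)) (kv : String × String) :
    PySem.Dict String (List String) :=
  if PySem.Str.strip kv.2 ≠ "" then
    if dic.contains kv.1 = false then
      dic.insert kv.1 [kv.2]            -- data_dic.update({key: [value]})
    else
      dic.modify kv.1 [] (fun l => l ++ [kv.2])   -- data_dic[key].append(value)
  else dic

def extract_all_fields (data : List (List (String × String))) : List (String × List String) :=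
  (data.foldl (fun dic ele => ele.foldl pvStepA dic)
    (PySem.Dict.empty : PySem.Dict String (List String))).items

-- ===== PORT B =====
-- one iteration of B's key scan: record a key the first time it carries a non-blank value
def pvStepK (st : List String × PySem.Set String) (kv : String × String) :
    List String × PySem.Set String :=
  if PySem.Str.strip kv.2 ≠ "" ∧ ¬ st.2.contains kv.1 = true then
    (st.1 ++ [kv.1], st.2.add kv.1)
  else st

-- the column of one key: every non-blank value stored under it, in data order
def pvColumn (data : List (List (String × String))) (key : String) : List String :=
  data.flatMap (fun ele => ele.filterMap (fun kv =>
    if kv.1 == key ∧ PySem.Str.strip kv.2 ≠ "" then some kv.2 else none))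

-- the final dict comprehension ranges over the distinct keys in first-appearance
-- order, so its association list is exactly this map
def extract_all_fields_alt (data : List (List (String × String))) : List (String × List String) :=
  ((data.foldl (fun st ele => ele.foldl pvStepK st) ([], PySem.Set.empty)).1).map
    (fun key => (key, pvColumn data key))

-- ===== PRECONDITION & SPEC =====
def Spec_extract_all_fields (data : List (List (String × String))) (out : List (String × List String)) : Prop := out = extract_all_fields_alt data
instance (data : List (List (String × String))) (out : List (String × List String)) : Decidable (Spec_extract_all_fields data out) := by unfold Spec_extract_all_fields; infer_instance

-- ===== CLAIM (what is proved, stated in full; the proofs are below) =====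
def Claim_equal_extract_all_fields : Prop := ∀ (data : List (List (String × String))), Dom_extract_all_fields data → Spec_extract_all_fields data (extract_all_fields data)

-- ===== LEMMAS AND PROOFS =====

-- the cell extractor pvColumn applies per pair
def pvCell (key : String) (kv : String × String) : Option String :=
  if kv.1 == key ∧ PySem.Str.strip kv.2 ≠ "" then some kv.2 else none

lemma pvColumn_eq_filterMap (data : List (List (String × String))) (key : String) :
    pvColumn data key = (data.flatMap id).filterMap (pvCell key) := by
  induction data with
  | nil => rfl
  | cons ele rest ih =>
      simp [pvColumn, pvCell, List.flatMap_cons, List.filterMap_append] at *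
      simpa using ih

lemma pvFoldl_flatten {σ α : Type} (f : σ → α → σ) (data : List (List α)) (init : σ) :
    data.foldl (fun s ele => ele.foldl f s) init = (data.flatMap id).foldl f init := by
  induction data generalizing init with
  | nil => rfl
  | cons ele rest ih => simp [List.flatMap_cons, List.foldl_append, ih]

-- lookup in a dict whose items are a map over keys: the first match carries v key
lemma pvGet?_map (ks : List String) (v : String → List String) (key : String) :
    (PySem.Dict.mk (ks.map (fun k => (k, v k)))).get? key
      = if key ∈ ks then some (v key) else none := by
  induction ks with
  | nil => simp [PySem.Dict.get?]
  | cons a rest ih =>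
      rw [List.map_cons, PySem.Dict.get?_mk_cons, ih]
      by_cases h : a = key
      · subst h; simp
      · simp [h, Ne.symm h]

-- the joint invariant of A's dict loop and B's key scan, over the flattened cell stream
lemma pvMain (ps : List (String × String)) :
    (ps.foldl pvStepA PySem.Dict.empty).items
      = ((ps.foldl pvStepK ([], PySem.Set.empty)).1).map
          (fun k => (k, ps.filterMap (pvCell k)))
    ∧ (ps.foldl pvStepK ([], PySem.Set.empty)).2
        = (ps.foldl pvStepK ([], PySem.Set.empty)).1
    ∧ (∀ k, k ∉ (ps.foldl pvStepK ([], PySem.Set.empty)).1 →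
        ps.filterMap (pvCell k) = []) := by
  induction ps using List.reverseRecOn with
  | nil => exact ⟨rfl, rfl, fun k _ => rfl⟩
  | append_singleton ps p ih =>
      obtain ⟨h1, h2, h3⟩ := ih
      rw [List.foldl_append, List.foldl_append]
      simp only [List.foldl_cons, List.foldl_nil]
      by_cases hs : PySem.Str.strip p.2 ≠ ""
      · by_cases hc : p.1 ∈ (ps.foldl pvStepK ([], PySem.Set.empty)).1
        · -- key already recorded: A appends to the existing list, B's state unchanged
          have hcontains : (ps.foldl pvStepA PySem.Dict.empty).contains p.1 = true := by
            simp only [PySem.Dict.contains, h1, List.any_map]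
            exact List.any_eq_true.2 ⟨p.1, hc, by simp⟩
          have hsn : (ps.foldl pvStepK ([], PySem.Set.empty)).2.contains p.1 = true := by
            rw [h2]; simpa using hc
          rw [pvStepK, if_neg (fun h => absurd hsn h.2)]
          have hget : (ps.foldl pvStepA PySem.Dict.empty).getD p.1 []
              = ps.filterMap (pvCell p.1) := by
            have hd : (ps.foldl pvStepA PySem.Dict.empty)
                = PySem.Dict.mk (((ps.foldl pvStepK ([], PySem.Set.empty)).1).map
                    (fun k => (k, ps.filterMap (pvCell k)))) := PySem.Dict.ext h1
            rw [hd, PySem.Dict.getD, pvGet?_map, if_pos hc, Option.getD_some]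
          refine ⟨?_, h2, ?_⟩
          · rw [pvStepA, if_pos hs, if_neg (by simp [hcontains])]
            simp only [PySem.Dict.modify]
            rw [hget, PySem.Dict.insert, if_pos hcontains]
            show List.map _ (ps.foldl pvStepA PySem.Dict.empty).items = _
            rw [h1, List.map_map]
            refine List.map_congr_left (fun k hk => ?_)
            by_cases hkp : k = p.1
            · subst hkp
              simp [pvCell, hs, List.filterMap_append]
            · simp [pvCell, Function.comp, hkp, Ne.symm hkp, List.filterMap_append]
          · intro k hk
            rw [List.filterMap_append, h3 k hk]
            have hne : p.1 ≠ k := fun h => hk (h ▸ hc)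
            simp [pvCell, hne]
        · -- new key: A appends a fresh entry, B records the key
          have hcontains : (ps.foldl pvStepA PySem.Dict.empty).contains p.1 = false := by
            simp only [PySem.Dict.contains, h1, List.any_map]
            simp only [List.any_eq_false, Function.comp, beq_iff_eq]
            exact fun x hx h => hc (h ▸ hx)
          have hsn : ¬ (ps.foldl pvStepK ([], PySem.Set.empty)).2.contains p.1 = true := by
            rw [h2]; simpa using hc
          rw [pvStepK, if_pos ⟨hs, hsn⟩]
          have hadd : (ps.foldl pvStepK ([], PySem.Set.empty)).2.add p.1
              = (ps.foldl pvStepK ([], PySem.Set.empty)).1 ++ [p.1] := by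
            rw [PySem.Set.add, if_neg hsn, h2]
          refine ⟨?_, by simpa using hadd, ?_⟩
          · rw [pvStepA, if_pos hs, if_pos hcontains, PySem.Dict.insert,
              if_neg (by simp [hcontains])]
            show (ps.foldl pvStepA PySem.Dict.empty).items ++ _ = _
            rw [h1, List.map_append]
            congr 1
            · refine List.map_congr_left (fun k hk => ?_)
              have hne : p.1 ≠ k := fun h => hc (h ▸ hk)
              simp [pvCell, hne, List.filterMap_append]
            · simp only [List.map_cons, List.map_nil, List.filterMap_append,
                h3 p.1 hc, List.nil_append]
              simp [pvCell, hs]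
          · intro k hk
            simp only [List.mem_append, List.mem_singleton, not_or] at hk
            rw [List.filterMap_append, h3 k hk.1]
            simp [pvCell, Ne.symm hk.2]
      · -- blank value: both loops skip the cell and every column is unchanged
        rw [pvStepA, if_neg hs, pvStepK, if_neg (fun h => hs h.1)]
        refine ⟨?_, h2, ?_⟩
        · rw [h1]
          refine List.map_congr_left (fun k _ => ?_)
          simp [pvCell, hs, List.filterMap_append]
        · intro k hk
          rw [List.filterMap_append, h3 k hk]
          simp [pvCell, hs]

-- ===== VERDICT (by name: the statement is the Claim_ definition above) =====
theorem extract_all_fields_spec : Claim_equal_extract_all_fields := by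
  intro data _
  show _ = _
  unfold extract_all_fields extract_all_fields_alt
  rw [pvFoldl_flatten, pvFoldl_flatten]
  rw [(pvMain (data.flatMap id)).1]
  refine List.map_congr_left (fun k _ => ?_)
  rw [pvColumn_eq_filterMap]
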